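-- pv_equiv track=rewrite | github.com/ningit/ctxform | ctxform/ltl.py | get_invariants
-- ===== SOURCE A (Python) =====
-- import itertools
--
-- def get_invariants(trace):
-- 	"""Get the invariant atomic proposition values of a trace"""
--
-- 	prefix, cycle = trace
-- 	invariants, conflicting = {}, set()
--
-- 	# We keep in invariants the variable and values that
-- 	# are maintained during the whole run
-- 	for step in itertools.chain(prefix, cycle):
-- 		for var, value in step.items():
-- 			# If the variable is new and not conflicting, take this value
-- 			if (old_value := invariants.get(var)) is None:
-- 				if var not in conflicting:
-- 					invariants[var] = value
-- 			# If the variable is known and its value differs, remove it from the invariants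
-- 			elif old_value != value:
-- 				invariants.pop(var)
-- 				conflicting.add(var)
--
-- 	return invariants
-- ===== SOURCE B (Python) =====
-- import itertools
--
-- def get_invariants(trace):
-- 	"""Get the invariant atomic proposition values of a trace"""
--
-- 	prefix, cycle = trace
--
-- 	# Group every value each variable takes across the whole run
-- 	values = {}
-- 	for step in itertools.chain(prefix, cycle):
-- 		for var, value in step.items():
-- 			values.setdefault(var, []).append(value)
--
-- 	# Keep only the variables whose value never changes
-- 	return {var: vals[0] for var, vals in values.items()
-- 	        if all(v == vals[0] for v in vals)}
-- ===== Notes on version B (the rewrite author's own statement) =====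
-- stated objective: simpler
-- what changed: Replaced the incremental invariants/conflicting-set maintenance (insert, compare, pop, blacklist) by a two-phase group-then-filter decomposition: first group every value each variable takes into a dict of lists, then keep via a comprehension only the variables whose values all equal the first one.
import Mathlib
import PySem

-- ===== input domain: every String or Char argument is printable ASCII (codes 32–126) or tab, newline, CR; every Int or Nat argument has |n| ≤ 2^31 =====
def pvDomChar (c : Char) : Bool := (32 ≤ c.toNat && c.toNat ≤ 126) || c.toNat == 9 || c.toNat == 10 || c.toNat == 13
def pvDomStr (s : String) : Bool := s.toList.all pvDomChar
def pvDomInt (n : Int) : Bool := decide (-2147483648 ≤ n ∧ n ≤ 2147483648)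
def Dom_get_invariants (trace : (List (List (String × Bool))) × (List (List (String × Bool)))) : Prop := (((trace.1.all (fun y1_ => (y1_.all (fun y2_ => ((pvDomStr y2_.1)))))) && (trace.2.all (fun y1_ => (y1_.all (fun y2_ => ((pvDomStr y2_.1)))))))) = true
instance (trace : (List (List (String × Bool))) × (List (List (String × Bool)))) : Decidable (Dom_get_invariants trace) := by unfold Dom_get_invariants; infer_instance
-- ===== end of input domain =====

-- B replaces A's incremental invariants/conflicting-set bookkeeping by a two-phase
-- group-then-filter decomposition (objective: simpler, same cost).
-- Each step (a Python dict) arrives as an association list; both ports read it through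
-- PySem.Dict.ofList, which is exact for Python's dict construction (last value, first position).

-- ===== PORT A =====
-- loop body of A: new & not conflicting → insert; known & different → pop and blacklist
def pvStepA (st : PySem.Dict String Bool × PySem.Set String) (p : String × Bool) :
    PySem.Dict String Bool × PySem.Set String :=
  match st.1.get? p.1 with
  | none => if PySem.Set.contains st.2 p.1 then st else (st.1.insert p.1 p.2, st.2)
  | some old => if old != p.2 then (st.1.erase p.1, PySem.Set.add st.2 p.1) else st

def get_invariants (trace : (List (List (String × Bool))) × (List (List (String × Bool)))) : List (String × Bool) :=
  ((trace.1 ++ trace.2).foldl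
      (fun st step => ((PySem.Dict.ofList step).items).foldl pvStepA st)
      ((PySem.Dict.empty : PySem.Dict String Bool), (PySem.Set.empty : PySem.Set String))).1.items

-- ===== PORT B =====
-- grouping loop body of B: values.setdefault(var, []).append(value)
def pvStepB (d : PySem.Dict String (List Bool)) (p : String × Bool) : PySem.Dict String (List Bool) :=
  d.modify p.1 [] (fun vs => vs ++ [p.2])

-- comprehension body of B: keep var ↦ vals[0] iff all values equal vals[0]
def pvKeep (p : String × List Bool) : Option (String × Bool) :=
  match p.2 with
  | [] => none  -- vals[0] on an empty group: unreachable, every group gets at least one value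
  | v0 :: _ => if p.2.all (fun v => v == v0) then some (p.1, v0) else none

def get_invariants_alt (trace : (List (List (String × Bool))) × (List (List (String × Bool)))) : List (String × Bool) :=
  let values := (trace.1 ++ trace.2).foldl
      (fun d step => ((PySem.Dict.ofList step).items).foldl pvStepB d)
      (PySem.Dict.empty : PySem.Dict String (List Bool))
  values.items.filterMap pvKeep

-- ===== PRECONDITION & SPEC =====
def Spec_get_invariants (trace : (List (List (String × Bool))) × (List (List (String × Bool)))) (out : List (String × Bool)) : Prop := out = get_invariants_alt trace
instance (trace : (List (List (String × Bool))) × (List (List (String × Bool)))) (out : List (String × Bool)) : Decidable (Spec_get_invariants trace out) := by unfold Spec_get_invariants; infer_instance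

-- ===== CLAIM (what is proved, stated in full; the proofs are below) =====
def Claim_equal_get_invariants : Prop := ∀ (trace : (List (List (String × Bool))) × (List (List (String × Bool)))), Dom_get_invariants trace → Spec_get_invariants trace (get_invariants trace)

-- ===== LEMMAS AND PROOFS =====

-- 'first value if all values equal it' (what both programs compute per variable)
def pvFg (vals : List Bool) : Option Bool :=
  match vals with
  | [] => none
  | v0 :: _ => if vals.all (fun v => v == v0) then some v0 else none

-- the values a variable takes along the flattened run
def pvOcc (l : List (String × Bool)) (v : String) : List Bool :=
  (l.filter (fun p => p.1 == v)).map (·.2)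

-- common normal form of both results
def pvF (l : List (String × Bool)) : List (String × Bool) :=
  (PySem.Set.ofList (l.map Prod.fst)).filterMap (fun v => (pvFg (pvOcc l v)).map (fun b => (v, b)))

lemma pv_foldl_nested {α β : Type} (f : α → β → α) (L : List (List β)) (init : α) :
    L.foldl (fun st step => step.foldl f st) init = L.flatten.foldl f init := by
  induction L generalizing init with
  | nil => rfl
  | cons s L ih => simp [List.foldl_append, ih]

lemma pvOcc_append_singleton (l : List (String × Bool)) (p : String × Bool) (v : String) :
    pvOcc (l ++ [p]) v = pvOcc l v ++ (if p.1 == v then [p.2] else []) := by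
  simp only [pvOcc, List.filter_append, List.map_append, List.filter_cons, List.filter_nil]
  split <;> simp

lemma pvOcc_eq_nil_iff (l : List (String × Bool)) (v : String) :
    pvOcc l v = [] ↔ v ∉ l.map Prod.fst := by
  simp only [pvOcc, List.map_eq_nil_iff, List.filter_eq_nil_iff, List.mem_map]
  constructor
  · rintro h ⟨p, hp, rfl⟩; simpa using h p hp
  · intro h p hp; simp only [beq_iff_eq]; exact fun he => h ⟨p, hp, he⟩

lemma pvFg_ext_none {vals : List Bool} (h : pvFg vals = none) (hne : vals ≠ []) (ws : List Bool) :
    pvFg (vals ++ ws) = none := by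
  cases vals with
  | nil => exact absurd rfl hne
  | cons v0 t =>
    simp only [pvFg, List.cons_append] at h ⊢
    split at h
    · exact absurd h (by simp)
    · rename_i hall
      rw [if_neg]
      simp only [List.all_append, Bool.and_eq_true, List.all_cons] at hall ⊢
      intro hc; exact hall ⟨hc.1, hc.2.1⟩

lemma pvFg_ext_same {vals : List Bool} {v0 : Bool} (h : pvFg vals = some v0) :
    pvFg (vals ++ [v0]) = some v0 := by
  cases vals with
  | nil => simp [pvFg] at h
  | cons h0 t =>
    simp only [pvFg, List.cons_append] at h ⊢
    split at h
    · rename_i hall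
      obtain rfl : h0 = v0 := by injection h
      rw [if_pos]
      simpa using hall
    · exact absurd h (by simp)

lemma pvFg_ext_diff {vals : List Bool} {v0 w : Bool} (h : pvFg vals = some v0) (hw : w ≠ v0) :
    pvFg (vals ++ [w]) = none := by
  cases vals with
  | nil => simp [pvFg] at h
  | cons h0 t =>
    simp only [pvFg, List.cons_append] at h ⊢
    split at h
    · obtain rfl : h0 = v0 := by injection h
      rw [if_neg]
      simp [hw]
    · exact absurd h (by simp)

lemma pvFg_singleton (b : Bool) : pvFg [b] = some b := by simp [pvFg]

lemma pv_erase_items (d : PySem.Dict String Bool) (k : String) :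
    (d.erase k).items = d.items.filter (fun q => !(q.1 == k)) := rfl

-- filtering a keyed filterMap by key
lemma pv_filter_filterMap_key (s : List String) (g : String → Option Bool) (var : String) :
    (s.filterMap (fun v => (g v).map (fun b => (v, b)))).filter (fun q => !(q.1 == var))
      = s.filterMap (fun v => if v = var then none else (g v).map (fun b => (v, b))) := by
  induction s with
  | nil => rfl
  | cons x s ih =>
    simp only [List.filterMap_cons]
    cases hg : g x with
    | none => by_cases hx : x = var <;> simp [hx, ih]
    | some b =>
      by_cases hx : x = var
      · subst hx; simp [ih]
      · simp [hx, ih]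

lemma pv_map_fst_filterMap_sublist (s : List String) (g : String → Option Bool) :
    ((s.filterMap (fun v => (g v).map (fun b => (v, b)))).map Prod.fst).Sublist s := by
  induction s with
  | nil => simp
  | cons x s ih =>
    simp only [List.filterMap_cons]
    cases hg : g x with
    | none => exact ih.cons x
    | some b => simpa using ih.cons₂ x

lemma pv_mem_pvF_iff (l : List (String × Bool)) (var : String) (w : Bool) :
    (var, w) ∈ pvF l ↔ var ∈ l.map Prod.fst ∧ pvFg (pvOcc l var) = some w := by
  simp only [pvF, List.mem_filterMap]
  constructor
  · rintro ⟨v, hv, hf⟩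
    cases hg : pvFg (pvOcc l v) with
    | none => simp [hg] at hf
    | some b =>
      simp only [hg, Option.map_some, Option.some_inj, Prod.mk.injEq] at hf
      obtain ⟨rfl, rfl⟩ := hf
      exact ⟨(PySem.Set.mem_ofList _ _).1 hv, hg⟩
  · rintro ⟨hmem, hg⟩
    exact ⟨var, (PySem.Set.mem_ofList _ _).2 hmem, by simp [hg]⟩

lemma pvF_keys_nodup (l : List (String × Bool)) : ((pvF l).map Prod.fst).Nodup :=
  (pv_map_fst_filterMap_sublist _ _).nodup (PySem.Set.nodup_ofList _)

-- characterization of A's loop state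
lemma pv_stateA_char (l : List (String × Bool)) :
    (l.foldl pvStepA ((PySem.Dict.empty : PySem.Dict String Bool), (PySem.Set.empty : PySem.Set String))).1.items = pvF l
    ∧ ∀ v, v ∈ (l.foldl pvStepA ((PySem.Dict.empty : PySem.Dict String Bool), (PySem.Set.empty : PySem.Set String))).2 ↔
        (v ∈ l.map Prod.fst ∧ pvFg (pvOcc l v) = none) := by
  induction l using List.reverseRecOn with
  | nil => exact ⟨rfl, by simp [PySem.Set.empty]⟩
  | append_singleton l p ih =>
    obtain ⟨ih1, ih2⟩ := ih
    rw [List.foldl_append]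
    set st := l.foldl pvStepA ((PySem.Dict.empty : PySem.Dict String Bool), (PySem.Set.empty : PySem.Set String)) with hst
    have hkn : st.1.keys.Nodup := by
      simp only [PySem.Dict.keys, ih1]; exact pvF_keys_nodup l
    have hsome : ∀ w, (p.1, w) ∈ pvF l → st.1.get? p.1 = some w := by
      intro w hw
      exact PySem.Dict.get?_of_mem_items _ (show (p.1, w) ∈ st.1.items by rw [ih1]; exact hw) hkn
    -- names notation
    have hnames : (l ++ [p]).map Prod.fst = l.map Prod.fst ++ [p.1] := by simp
    cases hg : st.1.get? p.1 with
    | none =>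
      cases hc : PySem.Set.contains st.2 p.1 with
      | true =>
        -- conflicting variable: nothing happens
        have hcm : p.1 ∈ st.2 := (PySem.Set.contains_iff _ _).1 hc
        have hmem : p.1 ∈ l.map Prod.fst ∧ pvFg (pvOcc l p.1) = none := (ih2 p.1).1 hcm
        have hocc_ne : pvOcc l p.1 ≠ [] := fun h => ((pvOcc_eq_nil_iff l p.1).1 h) hmem.1
        have hfg' : pvFg (pvOcc (l ++ [p]) p.1) = none := by
          rw [pvOcc_append_singleton]
          exact pvFg_ext_none hmem.2 hocc_ne _
        have hstep : pvStepA st p = st := by simp [pvStepA, hg, hcm]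
        rw [List.foldl_cons, List.foldl_nil, hstep]
        constructor
        · rw [ih1, pvF, pvF, hnames, PySem.Set.ofList_append_singleton,
            PySem.Set.add_of_mem ((PySem.Set.mem_ofList _ _).2 hmem.1)]
          apply List.filterMap_congr
          intro v hv
          by_cases hvp : p.1 = v
          · subst hvp; rw [hfg', hmem.2]
          · rw [pvOcc_append_singleton, if_neg (by simpa using hvp), List.append_nil]
        · intro v
          rw [ih2 v, hnames]
          by_cases hvp : v = p.1
          · subst hvp; simp [hmem.1, hmem.2, hfg']
          · rw [pvOcc_append_singleton, if_neg (by simpa using (Ne.symm hvp)), List.append_nil]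
            simp [hvp]
      | false =>
        -- genuinely new variable: insert
        have hfresh : p.1 ∉ l.map Prod.fst := by
          intro hmem
          cases hfg : pvFg (pvOcc l p.1) with
          | none =>
            have : p.1 ∈ st.2 := (ih2 p.1).2 ⟨hmem, hfg⟩
            rw [(PySem.Set.contains_iff _ _).2 this] at hc; cases hc
          | some w =>
            have := hsome w ((pv_mem_pvF_iff l p.1 w).2 ⟨hmem, hfg⟩)
            rw [hg] at this; cases this
        have hocc_nil : pvOcc l p.1 = [] := (pvOcc_eq_nil_iff l p.1).2 hfresh
        have hocc' : pvOcc (l ++ [p]) p.1 = [p.2] := by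
          rw [pvOcc_append_singleton, hocc_nil, if_pos (by simp)]; rfl
        have hcontains : st.1.contains p.1 = false := by
          rw [PySem.Dict.contains_eq_isSome_get?, hg]; rfl
        have hnm : p.1 ∉ st.2 := fun h => by
          rw [(PySem.Set.contains_iff st.2 p.1).2 h] at hc; cases hc
        have hstep : pvStepA st p = (st.1.insert p.1 p.2, st.2) := by simp [pvStepA, hg, hnm]
        rw [List.foldl_cons, List.foldl_nil, hstep]
        constructor
        · rw [PySem.Dict.items_insert_of_not_contains _ _ hcontains, ih1, pvF, pvF, hnames,
            PySem.Set.ofList_append_singleton,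
            PySem.Set.add_of_not_mem (fun h => hfresh ((PySem.Set.mem_ofList _ _).1 h)),
            List.filterMap_append]
          congr 1
          · apply List.filterMap_congr
            intro v hv
            have hvp : ¬ p.1 = v := fun h => hfresh (h ▸ (PySem.Set.mem_ofList _ _).1 hv)
            rw [pvOcc_append_singleton, if_neg (by simpa using hvp), List.append_nil]
          · simp [hocc', pvFg_singleton]
        · intro v
          rw [ih2 v, hnames]
          by_cases hvp : v = p.1
          · subst hvp
            simp [hfresh, hocc', pvFg_singleton]
          · rw [pvOcc_append_singleton, if_neg (by simpa using (Ne.symm hvp)), List.append_nil]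
            simp [hvp]
    | some old =>
      have hchar : p.1 ∈ l.map Prod.fst ∧ pvFg (pvOcc l p.1) = some old := by
        have : (p.1, old) ∈ pvF l := by
          rw [← ih1]
          exact PySem.Dict.mem_items_of_get?_eq_some _ hg
        exact (pv_mem_pvF_iff l p.1 old).1 this
      have hnc : p.1 ∉ st.2 := by
        intro hmem
        have := ((ih2 p.1).1 hmem).2
        rw [hchar.2] at this; cases this
      by_cases hv : old = p.2
      · -- same value again: nothing happens
        have hfg' : pvFg (pvOcc (l ++ [p]) p.1) = some old := by
          rw [pvOcc_append_singleton, if_pos (by simp), ← hv]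
          exact pvFg_ext_same hchar.2
        have hstep : pvStepA st p = st := by simp [pvStepA, hg, hv]
        rw [List.foldl_cons, List.foldl_nil, hstep]
        constructor
        · rw [ih1, pvF, pvF, hnames, PySem.Set.ofList_append_singleton,
            PySem.Set.add_of_mem ((PySem.Set.mem_ofList _ _).2 hchar.1)]
          apply List.filterMap_congr
          intro v hv
          by_cases hvp : p.1 = v
          · subst hvp; rw [hfg', hchar.2]
          · rw [pvOcc_append_singleton, if_neg (by simpa using hvp), List.append_nil]
        · intro v
          rw [ih2 v, hnames]
          by_cases hvp : v = p.1
          · subst hvp; simp [hchar.1, hchar.2, hfg']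
          · rw [pvOcc_append_singleton, if_neg (by simpa using (Ne.symm hvp)), List.append_nil]
            simp [hvp]
      · -- different value: pop + blacklist
        have hfg' : pvFg (pvOcc (l ++ [p]) p.1) = none := by
          rw [pvOcc_append_singleton, if_pos (by simp)]
          exact pvFg_ext_diff hchar.2 (Ne.symm hv)
        have hbne : (old != p.2) = true := by simpa using hv
        have hstep : pvStepA st p = (st.1.erase p.1, PySem.Set.add st.2 p.1) := by
          simp [pvStepA, hg, hbne]
        rw [List.foldl_cons, List.foldl_nil, hstep]
        constructor
        · rw [pv_erase_items, ih1, pvF, pvF, hnames, PySem.Set.ofList_append_singleton,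
            PySem.Set.add_of_mem ((PySem.Set.mem_ofList _ _).2 hchar.1),
            pv_filter_filterMap_key]
          apply List.filterMap_congr
          intro v hv
          by_cases hvp : v = p.1
          · subst hvp; rw [if_pos rfl, hfg']; rfl
          · rw [if_neg hvp, pvOcc_append_singleton,
              if_neg (by simpa using (Ne.symm hvp)), List.append_nil]
        · intro v
          rw [PySem.Set.mem_add, ih2 v, hnames]
          by_cases hvp : v = p.1
          · subst hvp; simp [hchar.1, hfg']
          · rw [pvOcc_append_singleton, if_neg (by simpa using (Ne.symm hvp)), List.append_nil]
            simp [hvp]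

lemma pvKeep_eq (p : String × List Bool) :
    pvKeep p = (pvFg p.2).map (fun b => (p.1, b)) := by
  obtain ⟨k, vals⟩ := p
  cases vals with
  | nil => rfl
  | cons v0 t =>
    simp only [pvKeep, pvFg]
    split <;> rfl

-- characterization of B's result
lemma pv_alt_char (l : List (String × Bool)) :
    ((l.foldl pvStepB (PySem.Dict.empty : PySem.Dict String (List Bool))).items.filterMap pvKeep) = pvF l := by
  have hB : l.foldl pvStepB (PySem.Dict.empty : PySem.Dict String (List Bool))
      = l.foldl (fun d p => d.modify p.1 [] (fun vs => vs ++ [p.2]))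
          (PySem.Dict.empty : PySem.Dict String (List Bool)) := rfl
  set dv := l.foldl pvStepB (PySem.Dict.empty : PySem.Dict String (List Bool)) with hdv
  have hkeys : dv.keys = PySem.Set.ofList (l.map Prod.fst) := by
    rw [hB, PySem.Dict.keys_foldl_modify_key l Prod.fst [] (fun _ p vs => vs ++ [p.2])]
    simp [PySem.Dict.keys_empty, PySem.Set.update_nil_left]
  have hnd : dv.keys.Nodup := by
    rw [hB]
    exact PySem.Dict.nodup_keys_foldl_modify_key l Prod.fst [] (fun _ p vs => vs ++ [p.2]) _
      (by simp [PySem.Dict.keys_empty])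
  have hgetD : ∀ v, dv.getD v [] = pvOcc l v := by
    intro v
    rw [hB, PySem.Dict.getD_foldl_modify_append l _ v]
    simp [pvOcc, PySem.Dict.getD_empty]
  rw [PySem.Dict.items_eq_map_keys dv hnd [], List.filterMap_map, hkeys, pvF]
  apply List.filterMap_congr
  intro v hv
  simp only [Function.comp_apply, pvKeep_eq, hgetD]

-- ===== VERDICT (by name: the statement is the Claim_ definition above) =====
theorem get_invariants_spec : Claim_equal_get_invariants := by
  intro trace _
  show get_invariants trace = get_invariants_alt trace
  simp only [get_invariants, get_invariants_alt]
  rw [← List.foldl_map (f := fun s => (PySem.Dict.ofList s).items)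
        (g := fun st (step : List (String × Bool)) => step.foldl pvStepA st),
      ← List.foldl_map (f := fun s => (PySem.Dict.ofList s).items)
        (g := fun d (step : List (String × Bool)) => step.foldl pvStepB d),
      pv_foldl_nested, pv_foldl_nested,
      (pv_stateA_char _).1, pv_alt_char]
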